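-- pv_equiv track=rewrite | github.com/firas357952/france-ioi | Test_Niveau_4/Intervalle.py | Ajout
-- ===== SOURCE A (Python) =====
-- def Ajout(I):
--     A = [(I[0][0], I[0][1], 0)]
--     i = 1
--     while i <= len(I) - 1:
--         if I[i] == I[i - 1]:
--             k = A[i - 1][2]
--             A.append((I[i][0], I[i][1], k))
--         else:
--             A.append((I[i][0], I[i][1], i))
--         i += 1
--     return A
-- ===== SOURCE B (Python) =====
-- from itertools import groupby
--
-- def Ajout(I):
--     out = []
--     idx = 0
--     for key, grp in groupby(I):
--         start = idx
--         for _ in grp: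
--             out.append((key[0], key[1], start))
--             idx += 1
--     return out
-- ===== Notes on version B (the rewrite author's own statement) =====
-- stated objective: idiomatic
-- what changed: Replaces the index-based while loop with adjacent-element comparison and A[i-1] lookups by an itertools.groupby pass over runs of equal elements, tagging each run member with the run's start index from a running counter.
-- crash fix: On the empty list A raises IndexError (it reads I[0] before looping); B returns []. — e.g. on Ajout([]): A raises IndexError, B returns []
import Mathlib
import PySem

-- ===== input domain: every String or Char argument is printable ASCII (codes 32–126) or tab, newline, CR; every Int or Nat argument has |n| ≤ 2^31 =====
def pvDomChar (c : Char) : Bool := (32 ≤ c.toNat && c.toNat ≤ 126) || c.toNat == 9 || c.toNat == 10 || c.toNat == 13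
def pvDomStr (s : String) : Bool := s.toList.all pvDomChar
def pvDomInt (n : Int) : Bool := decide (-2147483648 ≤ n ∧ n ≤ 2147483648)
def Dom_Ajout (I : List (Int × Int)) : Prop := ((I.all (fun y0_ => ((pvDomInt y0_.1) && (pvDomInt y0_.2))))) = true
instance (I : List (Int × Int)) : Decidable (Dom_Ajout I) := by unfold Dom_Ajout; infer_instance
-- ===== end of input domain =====

-- B replaces A's index-based while loop (adjacent comparison + A[i-1] lookup) by a groupby pass
-- over runs of equal elements, tagging each run member with the run's start index (objective:
-- idiomatic). Where A raises IndexError (empty I), B returns [].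

-- ===== PORT A =====

-- one iteration of A's while-loop body, state = the accumulating list A, loop variable i
def ajoutStep (I : List (Int × Int)) (A : List (Int × Int × Int)) (i : Int) : List (Int × Int × Int) :=
  match PySem.List.pyGet? I i, PySem.List.pyGet? I (i - 1) with
  | some cur, some prev =>
      if cur == prev then
        match PySem.List.pyGet? A (i - 1) with
        | some a => A ++ [(cur.1, cur.2, a.2.2)]   -- k = A[i-1][2]
        | none => A                                -- unreachable in Python (IndexError)
      else A ++ [(cur.1, cur.2, i)]
  | _, _ => A

def Ajout (I : List (Int × Int)) : List (Int × Int × Int) :=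
  match PySem.List.pyGet? I 0 with
  | none => []   -- Python raises IndexError on I[0]; excluded by Pre_Ajout
  | some h =>
    (PySem.List.pyRange 1 (I.length) 1).foldl (ajoutStep I) [(h.1, h.2, 0)]

-- ===== PORT B =====

-- itertools.groupby: running (key, count of current run); emits a run when the key changes
def runsAux (key : Int × Int) (cnt : Nat) : List (Int × Int) → List ((Int × Int) × Nat)
  | [] => [(key, cnt)]
  | x :: xs => if x == key then runsAux key (cnt + 1) xs else (key, cnt) :: runsAux x 1 xs

def runsB : List (Int × Int) → List ((Int × Int) × Nat)
  | [] => []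
  | x :: xs => runsAux x 1 xs

-- the outer for-loop of Source B: for each (key, n) emit n tuples tagged with the run-start idx
def emitB : List ((Int × Int) × Nat) → Int → List (Int × Int × Int)
  | [], _ => []
  | (k, n) :: rest, idx => List.replicate n (k.1, k.2, idx) ++ emitB rest (idx + n)

def Ajout_alt (I : List (Int × Int)) : List (Int × Int × Int) :=
  emitB (runsB I) 0

-- ===== PRECONDITION & SPEC =====
-- Pre_ excludes only the empty list, on which A raises IndexError (it reads I[0] before looping).
def Pre_Ajout (I : List (Int × Int)) : Prop := I ≠ []
instance (I : List (Int × Int)) : Decidable (Pre_Ajout I) := by unfold Pre_Ajout; infer_instance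
def pvWitness_Ajout : (List (Int × Int)) := [(1, 2), (1, 2), (3, 4)]

-- On the empty list A raises IndexError (it reads I[0] before looping); B returns [].
def Raises_Ajout (I : List (Int × Int)) : Prop := I = []
instance (I : List (Int × Int)) : Decidable (Raises_Ajout I) := by unfold Raises_Ajout; infer_instance
def pvRaiseWitness_Ajout : (List (Int × Int)) := []
def pvRaiseWitnessOut_Ajout : List (Int × Int × Int) := []

def Spec_Ajout (I : List (Int × Int)) (out : List (Int × Int × Int)) : Prop := out = Ajout_alt I
instance (I : List (Int × Int)) (out : List (Int × Int × Int)) : Decidable (Spec_Ajout I out) := by unfold Spec_Ajout; infer_instance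

-- ===== CLAIM (what is proved, stated in full; the proofs are below) =====
def Claim_equal_Ajout : Prop := ∀ (I : List (Int × Int)), Dom_Ajout I → Pre_Ajout I → Spec_Ajout I (Ajout I)
def Claim_raises_Ajout : Prop := (∀ (I : List (Int × Int)), Dom_Ajout I → Raises_Ajout I → ¬ Pre_Ajout I) ∧ (Dom_Ajout (pvRaiseWitness_Ajout) ∧ Raises_Ajout (pvRaiseWitness_Ajout) ∧ Ajout_alt (pvRaiseWitness_Ajout) = pvRaiseWitnessOut_Ajout)

-- ===== LEMMAS AND PROOFS =====

-- the common characterisation both ports are reduced to: walk the tail remembering the previous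
-- element, its tag, and the current index
def canon (prev : Int × Int) (pt : Int) (i : Int) : List (Int × Int) → List (Int × Int × Int)
  | [] => []
  | x :: xs =>
      let t := if x = prev then pt else i
      (x.1, x.2, t) :: canon x t (i + 1) xs

-- A's fold equals canon
lemma foldA (rest : List (Int × Int)) : ∀ (pre : List (Int × Int)) (Acc : List (Int × Int × Int))
    (prev : Int × Int) (pt : Int),
    pre.getLast? = some prev →
    Acc.length = pre.length →
    (∃ a b, Acc.getLast? = some (a, b, pt)) →
    (PySem.List.pyRange (pre.length) ((pre.length : Int) + rest.length) 1).foldl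
        (ajoutStep (pre ++ rest)) Acc
      = Acc ++ canon prev pt (pre.length) rest := by
  induction rest with
  | nil =>
      intro pre Acc prev pt _ _ _
      simp [PySem.List.pyRange_one_eq_nil, canon]
  | cons x xs ih =>
      intro pre Acc prev pt hlast hlen hAl
      have hpre : pre ≠ [] := by
        intro h; rw [h] at hlast; simp at hlast
      have hpos : 1 ≤ pre.length := List.length_pos_of_ne_nil hpre
      have hlt : (pre.length : Int) < (pre.length : Int) + (x :: xs).length := by
        simp
      rw [PySem.List.pyRange_one_cons hlt, List.foldl_cons]
      have hgetx : PySem.List.pyGet? (pre ++ x :: xs) (pre.length : Int) = some x :=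
        PySem.List.pyGet?_append_length pre xs x
      have hm1 : (pre.length : Int) - 1 = ((pre.length - 1 : Nat) : Int) := by
        push_cast [hpos]; ring
      have hgetprev : PySem.List.pyGet? (pre ++ x :: xs) ((pre.length : Int) - 1) = some prev := by
        rw [hm1, PySem.List.pyGet?_natCast,
          List.getElem?_append_left (by omega),
          ← List.getLast?_eq_getElem?, hlast]
      obtain ⟨a, b, hAlast⟩ := hAl
      have hgetA : PySem.List.pyGet? Acc ((pre.length : Int) - 1) = some (a, b, pt) := by
        rw [hm1, PySem.List.pyGet?_natCast, ← hlen, ← List.getLast?_eq_getElem?, hAlast]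
      have hstep : ajoutStep (pre ++ x :: xs) Acc (pre.length : Int)
          = Acc ++ [(x.1, x.2, if x = prev then pt else (pre.length : Int))] := by
        rw [ajoutStep, hgetx, hgetprev]
        by_cases hx : x = prev
        · simp [hx, hgetA]
        · simp [hx]
      rw [hstep]
      have hrec := ih (pre ++ [x]) (Acc ++ [(x.1, x.2, if x = prev then pt else (pre.length : Int))])
        x (if x = prev then pt else (pre.length : Int))
        (by simp) (by simp [hlen]) ⟨x.1, x.2, by simp⟩
      have hbound : ((pre ++ [x]).length : Int) + (xs.length : Int)
          = (pre.length : Int) + ((x :: xs).length : Int) := by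
        push_cast [List.length_append, List.length_cons, List.length_singleton, List.length_nil]; ring
      have hlen' : ((pre ++ [x]).length : Int) = (pre.length : Int) + 1 := by
        push_cast [List.length_append, List.length_singleton, List.length_nil]; ring
      have hlist : (pre ++ [x]) ++ xs = pre ++ x :: xs := by simp
      rw [hbound, hlen', hlist] at hrec
      rw [hrec]
      simp [canon]

-- B's grouping pass equals canon: inside a run of `key` started at tag i with cnt members seen
lemma emit_runsAux (l : List (Int × Int)) : ∀ (key : Int × Int) (cnt : Nat) (i : Int),
    emitB (runsAux key cnt l) i
      = List.replicate cnt (key.1, key.2, i) ++ canon key i (i + cnt) l := by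
  induction l with
  | nil => intro key cnt i; simp [runsAux, emitB, canon]
  | cons x xs ih =>
      intro key cnt i
      rw [runsAux]
      by_cases hx : x = key
      · rw [if_pos (by simp [hx]), ih]
        subst hx
        rw [canon, if_pos rfl, List.replicate_succ', List.append_assoc, List.singleton_append]
        congr 3
        omega
      · rw [if_neg (by simp [hx]), emitB, ih]
        rw [canon, if_neg hx, List.replicate_one, List.singleton_append]
        congr 3

-- ===== VERDICT (by name: the statement is the Claim_ definition above) =====
theorem Ajout_spec : Claim_equal_Ajout := by
  intro I _ hpre
  unfold Spec_Ajout
  match I, hpre with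
  | h :: tl, _ =>
      show Ajout (h :: tl) = Ajout_alt (h :: tl)
      have hA := foldA tl [h] [(h.1, h.2, 0)] h 0 (by simp) (by simp) ⟨h.1, h.2, by simp⟩
      have hB := emit_runsAux tl h 1 0
      simp only [List.singleton_append, List.length_singleton, Nat.cast_one] at hA
      unfold Ajout Ajout_alt runsB
      simp only [PySem.List.pyGet?_zero_cons]
      rw [show (((h :: tl).length : Nat) : Int) = 1 + (tl.length : Int) by
        push_cast [List.length_cons]; ring]
      rw [hA, hB]
      simp

@[simp] theorem Ajout_raises : Claim_raises_Ajout := by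
  unfold Claim_raises_Ajout
  exact ⟨by intro I _ hr hp; exact hp hr, by decide⟩
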